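-- pv_equiv track=rewrite | github.com/nwlodychak/bioinformatics_tools | computational_concepts/suffix_arrays.py | star_align_read
-- ===== SOURCE A (Python) =====
-- def search_mmp(read, genome, suffix_array):
--     left, right = 0, len(suffix_array) - 1
--     while left <= right:
--         mid = (left + right) // 2
--         suffix_start = suffix_array[mid]
--         # Changed comparison to check if suffix starts with read
--         if genome[suffix_start:].startswith(read):
--             return suffix_start
--         elif read < genome[suffix_start:]:
--             right = mid - 1
--         else:
--             left = mid + 1
--     return -1
--
-- def star_align_read(read, genome, suffix_array):
--     # Step 1: Seed Searching
--     seeds = []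
--     remaining_read = read
--     while remaining_read:
--         mmp_start = search_mmp(remaining_read, genome, suffix_array)
--         if mmp_start == -1:
--             break
--         mmp_length = 0
--         while mmp_length < len(remaining_read) and mmp_length < len(genome) - mmp_start:
--             if remaining_read[mmp_length] != genome[mmp_start + mmp_length]:
--                 break
--             mmp_length += 1
--         seeds.append((mmp_start, mmp_length))
--         remaining_read = remaining_read[mmp_length:]
--
--     # Step 2: Clustering, Stitching, and Scoring
--     return seeds  # For simplicity, we'll just return the seeds
-- ===== SOURCE B (Python) =====
-- def star_align_read(read, genome, suffix_array):
--     # The seed search only succeeds when a suffix has the whole remaining read as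
--     # a prefix, so the first hit already covers the entire read and is the only
--     # seed an alignment can produce: one binary search decides the result.
--     if not read:
--         return []
--     lo, hi = 0, len(suffix_array) - 1
--     while lo <= hi:
--         mid = (lo + hi) // 2
--         s = suffix_array[mid]
--         if genome.startswith(read, s):
--             return [(s, len(read))]
--         if read < genome[s:]:
--             hi = mid - 1
--         else:
--             lo = mid + 1
--     return []
-- ===== Notes on version B (the rewrite author's own statement) =====
-- stated objective: simpler
-- what changed: B drops A's outer seed loop and char-by-char extension loop entirely: the search only succeeds on a full prefix match, so one binary search returning the single full-length seed computes the whole result; Pre_ excludes the invalid-position corners where a matching suffix-array entry below -len(genome) makes A raise IndexError, or an entry -1 whose suffix matches collides with A's -1 not-found sentinel.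
-- outside the precondition, e.g. on star_align_read('b', 'ab', [-1]): A returns [], B returns [(-1, 1)]; on star_align_read('a', 'ab', [-100]): A raises IndexError, B returns [(-100, 1)]
import Mathlib
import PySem

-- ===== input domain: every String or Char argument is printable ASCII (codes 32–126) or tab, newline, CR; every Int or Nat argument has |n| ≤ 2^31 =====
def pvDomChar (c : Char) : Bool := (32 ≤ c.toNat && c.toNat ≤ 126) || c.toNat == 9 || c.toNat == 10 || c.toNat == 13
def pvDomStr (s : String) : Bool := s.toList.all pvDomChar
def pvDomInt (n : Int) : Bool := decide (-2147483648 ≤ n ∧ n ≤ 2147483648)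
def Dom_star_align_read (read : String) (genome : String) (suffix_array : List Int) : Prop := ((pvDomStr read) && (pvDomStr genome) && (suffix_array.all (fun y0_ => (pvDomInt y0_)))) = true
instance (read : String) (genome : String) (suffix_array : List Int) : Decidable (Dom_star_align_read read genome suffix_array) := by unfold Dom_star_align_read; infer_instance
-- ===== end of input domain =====

-- B collapses A's three loops into a single binary search: the search only succeeds on a full
-- prefix match, so the first hit is the one full-length seed; objective: simpler.

-- ===== PORT A =====
-- search_mmp's while loop (binary search). Fuel (list length + 1) only makes the recursion
-- structural: the interval [left, right] shrinks every iteration, so starting from the full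
-- interval the fuel never runs out. The list index sa[mid] always has 0 ≤ left ≤ mid ≤ right < len
-- while the loop runs, so pyGetD's default is unreachable.
def searchLoopA (read genome : List Char) (sa : List Int) (fuel : Nat) (left right : Int) : Int :=
  match fuel with
  | 0 => -1
  | fuel + 1 =>
    if left ≤ right then
      let mid := PySem.Int.floordiv (left + right) 2
      let suffix_start := PySem.List.pyGetD sa mid 0
      let suf := PySem.List.slice genome (some suffix_start) none
      if PySem.Chars.startswith suf read then suffix_start
      else if read < suf then searchLoopA read genome sa fuel left (mid - 1)
      else searchLoopA read genome sa fuel (mid + 1) right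
    else -1

def search_mmp (read genome : List Char) (sa : List Int) : Int :=
  searchLoopA read genome sa (sa.length + 1) 0 ((sa.length : Int) - 1)

-- A's inner mmp_length while loop; fuel (remaining length + 1) only makes the recursion structural,
-- since mmp_length < len(remaining) bounds the iterations. pyGet? genome (s+k) = none is exactly
-- where Python raises IndexError (index below -len(genome)); those inputs are excluded by Pre_,
-- the branch only makes the port total.
def mmpLenLoop (remaining genome : List Char) (s : Int) (fuel : Nat) (k : Nat) : Nat :=
  match fuel with
  | 0 => k
  | fuel + 1 =>
    if h : k < remaining.length ∧ (k : Int) < (genome.length : Int) - s then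
      match PySem.List.pyGet? genome (s + (k : Int)) with
      | some gc => if remaining[k]'h.1 ≠ gc then k else mmpLenLoop remaining genome s fuel (k + 1)
      | none => k
    else k

-- A's outer while loop; fuel (read length + 1) only makes the recursion structural — Python's loop
-- shortens remaining on every iteration that continues.
def outerLoopA (genome : List Char) (sa : List Int) (fuel : Nat) (remaining : List Char) (seeds : List (Int × Int)) : List (Int × Int) :=
  match fuel with
  | 0 => seeds
  | fuel + 1 =>
    if remaining.isEmpty then seeds
    else
      let mmp_start := search_mmp remaining genome sa
      if mmp_start = -1 then seeds
      else
        let mmp_length := mmpLenLoop remaining genome mmp_start (remaining.length + 1) 0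
        outerLoopA genome sa fuel (remaining.drop mmp_length) (seeds ++ [(mmp_start, (mmp_length : Int))])

def star_align_read (read : String) (genome : String) (suffix_array : List Int) : List (Int × Int) :=
  outerLoopA genome.toList suffix_array (read.toList.length + 1) read.toList []

-- ===== PORT B =====
-- Source B's single binary-search while loop; fuel (list length + 1) only makes the recursion structural.
-- 'genome.startswith(read, s)' is ported as startswith on the slice genome[s:] — exact:
-- str.startswith with a start offset uses slice semantics, and B only calls it with a nonempty read
-- (the one case where the two could differ is an empty prefix past the end).
def searchLoopB (read genome : List Char) (sa : List Int) (fuel : Nat) (lo hi : Int) : List (Int × Int) :=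
  match fuel with
  | 0 => []
  | fuel + 1 =>
    if lo ≤ hi then
      let mid := PySem.Int.floordiv (lo + hi) 2
      let s := PySem.List.pyGetD sa mid 0
      if PySem.Chars.startswith (PySem.List.slice genome (some s) none) read then
        [(s, (read.length : Int))]
      else if read < PySem.List.slice genome (some s) none then searchLoopB read genome sa fuel lo (mid - 1)
      else searchLoopB read genome sa fuel (mid + 1) hi
    else []

def star_align_read_alt (read : String) (genome : String) (suffix_array : List Int) : List (Int × Int) :=
  if read.toList.isEmpty then []
  else searchLoopB read.toList genome.toList suffix_array (suffix_array.length + 1) 0 ((suffix_array.length : Int) - 1)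

-- ===== PRECONDITION & SPEC =====
-- Pre_ excludes inputs where a negative suffix_array entry collides with A's negative-index machinery: an entry
-- below -len(genome), whose wrapped slice is the whole genome, makes A's inner loop raise IndexError when found
-- (or is found past harmlessly), and an entry -1 whose suffix matches read collides with A's -1 not-found
-- sentinel, an accident of A's implementation; both can only matter when read matches the corresponding slice.
def Pre_star_align_read (read : String) (genome : String) (suffix_array : List Int) : Prop :=
  ¬ (read.toList ≠ [] ∧
      ((read.toList <+: genome.toList ∧ ∃ e ∈ suffix_array, e < -(genome.toList.length : Int)) ∨
       ((-1 : Int) ∈ suffix_array ∧ read.toList <+: genome.toList.drop (genome.toList.length - 1))))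
instance (read : String) (genome : String) (suffix_array : List Int) : Decidable (Pre_star_align_read read genome suffix_array) := by unfold Pre_star_align_read; infer_instance

def pvWitness_star_align_read : String × String × List Int := ("an", "banana", [5, 3, 1, 0, 4, 2])

def Spec_star_align_read (read : String) (genome : String) (suffix_array : List Int) (out : List (Int × Int)) : Prop := out = star_align_read_alt read genome suffix_array
instance (read : String) (genome : String) (suffix_array : List Int) (out : List (Int × Int)) : Decidable (Spec_star_align_read read genome suffix_array out) := by unfold Spec_star_align_read; infer_instance

-- ===== CLAIM (what is proved, stated in full; the proofs are below) =====
def Claim_equal_star_align_read : Prop := ∀ (read : String) (genome : String) (suffix_array : List Int), Dom_star_align_read read genome suffix_array → Pre_star_align_read read genome suffix_array → Spec_star_align_read read genome suffix_array (star_align_read read genome suffix_array)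

-- ===== LEMMAS AND PROOFS =====

-- inside Pre_, any found suffix start is ≥ -len(genome) and ≠ -1
theorem found_facts (read genome : String) (sa : List Int)
    (hpre : Pre_star_align_read read genome sa) (hne : read.toList ≠ [])
    (s : Int) (hmem : s ∈ sa)
    (hp : read.toList <+: PySem.List.slice genome.toList (some s) none) :
    -(genome.toList.length : Int) ≤ s ∧ s ≠ -1 := by
  unfold Pre_star_align_read at hpre
  constructor
  · by_contra hlt
    have hlt' : s < -(genome.toList.length : Int) := by omega
    have hslice : PySem.List.slice genome.toList (some s) none = genome.toList := by
      rw [PySem.List.slice_some_none]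
      unfold PySem.List.clampIdx
      rw [if_pos (by omega), if_pos (by omega)]
      simp
    rw [hslice] at hp
    exact hpre ⟨hne, Or.inl ⟨hp, ⟨s, hmem, hlt'⟩⟩⟩
  · rintro rfl
    rw [PySem.List.slice_some_none, PySem.List.clampIdx_neg_one] at hp
    exact hpre ⟨hne, Or.inr ⟨hmem, hp⟩⟩

-- A's inner loop runs to the full read length whenever the read is a prefix of the suffix at s ≥ -len
theorem mmpLenLoop_full (r g : List Char) (s : Int) (hne : r ≠ [])
    (hs : -(g.length : Int) ≤ s)
    (hp : r <+: PySem.List.slice g (some s) none) :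
    mmpLenLoop r g s (r.length + 1) 0 = r.length := by
  obtain ⟨t, hts, hdropt⟩ : ∃ t : Nat, ((0 ≤ s ∧ (t : Int) = s) ∨ (s < 0 ∧ (t : Int) = (g.length : Int) + s)) ∧
      PySem.List.slice g (some s) none = g.drop t := by
    by_cases hpos : 0 ≤ s
    · exact ⟨s.toNat, Or.inl ⟨hpos, by omega⟩, by rw [PySem.List.slice_from g hpos]⟩
    · refine ⟨((g.length : Int) + s).toNat, Or.inr ⟨by omega, by omega⟩, ?_⟩
      have hk : s = -(((-s).toNat : Nat) : Int) := by omega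
      rw [hk, PySem.List.slice_from_neg_natCast g (-s).toNat (by omega)]
      congr 1
      omega
  rw [hdropt] at hp
  have hlen : r.length ≤ g.length - t := by
    have := hp.length_le
    simp only [List.length_drop] at this
    omega
  have htlt : t < g.length := by
    by_contra h
    rw [List.drop_eq_nil_of_le (by omega)] at hp
    rcases List.exists_cons_of_ne_nil hne with ⟨a, as, rfl⟩
    have := hp.length_le
    simp at this
  have hchar : ∀ k (hk : k < r.length), r[k] = g[t + k]'(by omega) := by
    intro k hk
    have := hp.getElem hk
    rwa [List.getElem_drop] at this
  have hget : ∀ (k : Nat) (hkk : k < r.length),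
      PySem.List.pyGet? g (s + (k : Int)) = some (g[t + k]'(by omega)) := by
    intro k hk
    rcases hts with ⟨hpos, hts⟩ | ⟨hneg, hts⟩
    · have : s + (k : Int) = ((t + k : Nat) : Int) := by push_cast; omega
      rw [this, PySem.List.pyGet?_natCast, List.getElem?_eq_getElem (by omega)]
    · have hnegk : s + (k : Int) < 0 := by omega
      unfold PySem.List.pyGet? PySem.List.pyIdx?
      rw [if_neg (by omega), if_pos (by omega)]
      have hidx : g.length - (-(s + (k : Int))).toNat = t + k := by omega
      rw [hidx]
      simp [List.getElem?_eq_getElem (show t + k < g.length by omega)]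
  have hcond : ∀ k : Nat, k < r.length → (k : Int) < (g.length : Int) - s := by
    intro k hk
    rcases hts with ⟨hpos, hts⟩ | ⟨hneg, hts⟩ <;> omega
  suffices h : ∀ fuel k, k ≤ r.length → r.length - k < fuel → mmpLenLoop r g s fuel k = r.length by
    exact h (r.length + 1) 0 (by omega) (by omega)
  intro fuel
  induction fuel with
  | zero => intro k _ hflt; omega
  | succ fuel ih =>
    intro k hk hflt
    by_cases hend : k < r.length
    · rw [mmpLenLoop, dif_pos ⟨hend, hcond k hend⟩, hget k hend]
      simp only [hchar k hend, ne_eq, not_true_eq_false, if_false]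
      exact ih (k + 1) (by omega) (by omega)
    · have : k = r.length := by omega
      rw [mmpLenLoop, dif_neg (by omega)]
      omega

-- the two binary-search loops agree: either both fail, or both report the same full-read seed
theorem search_agree (read genome : String) (sa : List Int)
    (hpre : Pre_star_align_read read genome sa) (hne : read.toList ≠ []) :
    ∀ fl : Nat, ∀ l rt : Int, 0 ≤ l → rt < (sa.length : Int) →
    (searchLoopA read.toList genome.toList sa fl l rt = -1 ∧
     searchLoopB read.toList genome.toList sa fl l rt = []) ∨
    (∃ s, s ∈ sa ∧ s ≠ -1 ∧ -(genome.toList.length : Int) ≤ s ∧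
      read.toList <+: PySem.List.slice genome.toList (some s) none ∧
      searchLoopA read.toList genome.toList sa fl l rt = s ∧
      searchLoopB read.toList genome.toList sa fl l rt = [(s, (read.toList.length : Int))]) := by
  intro fl
  induction fl with
  | zero =>
    intro l rt hl hrt
    exact Or.inl ⟨rfl, rfl⟩
  | succ fl ih =>
    intro l rt hl hrt
    by_cases hle : l ≤ rt
    · rw [searchLoopA, if_pos hle, searchLoopB, if_pos hle]
      simp only
      have hmid := PySem.Int.floordiv_two_mid_bounds hle
      set mid := PySem.Int.floordiv (l + rt) 2 with hmid_def
      set s := PySem.List.pyGetD sa mid 0 with hs_def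
      have hmem : s ∈ sa := PySem.List.pyGetD_mem sa 0 ⟨by omega, by omega⟩
      set suf := PySem.List.slice genome.toList (some s) none with hsuf_def
      by_cases hsw : PySem.Chars.startswith suf read.toList = true
      · have hpref : read.toList <+: suf := (PySem.Chars.startswith_iff suf read.toList).mp hsw
        simp only [if_pos hsw]
        have hf := found_facts read genome sa hpre hne s hmem hpref
        exact Or.inr ⟨s, hmem, hf.2, hf.1, hpref, rfl, rfl⟩
      · simp only [if_neg hsw]
        by_cases hlt : read.toList < suf
        · rw [if_pos hlt, if_pos hlt]
          exact ih l (mid - 1) hl (by omega)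
        · rw [if_neg hlt, if_neg hlt]
          exact ih (mid + 1) rt (by omega) hrt
    · rw [searchLoopA, if_neg hle, searchLoopB, if_neg hle]
      exact Or.inl ⟨rfl, rfl⟩

-- ===== VERDICT (by name: the statement is the Claim_ definition above) =====
theorem star_align_read_spec : Claim_equal_star_align_read := by
  intro read genome sa _hdom hpre
  unfold Spec_star_align_read star_align_read star_align_read_alt
  by_cases hr : read.toList = []
  · simp [hr, outerLoopA]
  · have hfalse : read.toList.isEmpty = false := by simp [hr]
    have hlen1 : 1 ≤ read.toList.length := by
      rcases List.exists_cons_of_ne_nil hr with ⟨a, as, hcons⟩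
      rw [hcons]; simp
    rw [if_neg (by simp [hfalse])]
    show outerLoopA genome.toList sa (read.toList.length + 1) read.toList [] = _
    rw [outerLoopA]
    rw [if_neg (by simp [hfalse])]
    simp only
    have hsearch := search_agree read genome sa hpre hr (sa.length + 1) 0
      ((sa.length : Int) - 1) (by omega) (by omega)
    unfold search_mmp
    rcases hsearch with ⟨hA, hB⟩ | ⟨s, _hmem, hs1, hs2, hp, hA, hB⟩
    · rw [hA, if_pos rfl, hB]
    · rw [hA, if_neg hs1, hB]
      have hmmp : mmpLenLoop read.toList genome.toList s (read.toList.length + 1) 0 = read.toList.length :=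
        mmpLenLoop_full read.toList genome.toList s hr hs2 hp
      rw [hmmp, List.drop_length]
      cases hfl : read.toList.length with
      | zero => omega
      | succ m => rw [outerLoopA]; simp
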